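-- pv_equiv track=rewrite | github.com/panov11/K-Means-vs-SymNMF | analysis.py | index_of_max_in_lists
-- ===== SOURCE A (Python) =====
-- def index_of_max_in_lists(list_of_lists):
--     max_indices = []
--     for lst in list_of_lists:
--         if len(lst) == 0:
--             max_indices.append(None)  # Append None for empty lists
--         else:
--             max_index = lst.index(max(lst))
--             max_indices.append(max_index)
--     return max_indices
-- ===== SOURCE B (Python) =====
-- def _first_max_index(lst):
--     # Single pass: running best value/index; strict '>' keeps the first maximum.
--     if not lst:
--         return None
--     best_i, best_v = 0, lst[0]
--     for i, v in enumerate(lst):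
--         if v > best_v:
--             best_i, best_v = i, v
--     return best_i
--
--
-- def index_of_max_in_lists(list_of_lists):
--     return [_first_max_index(lst) for lst in list_of_lists]
-- ===== Notes on version B (the rewrite author's own statement) =====
-- stated objective: alternative
-- what changed: Each sublist is scanned once with a running (best_value, best_index) pair instead of two passes (max() then .index()), and the result is built by a comprehension over a helper rather than an append loop.
import Mathlib
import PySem

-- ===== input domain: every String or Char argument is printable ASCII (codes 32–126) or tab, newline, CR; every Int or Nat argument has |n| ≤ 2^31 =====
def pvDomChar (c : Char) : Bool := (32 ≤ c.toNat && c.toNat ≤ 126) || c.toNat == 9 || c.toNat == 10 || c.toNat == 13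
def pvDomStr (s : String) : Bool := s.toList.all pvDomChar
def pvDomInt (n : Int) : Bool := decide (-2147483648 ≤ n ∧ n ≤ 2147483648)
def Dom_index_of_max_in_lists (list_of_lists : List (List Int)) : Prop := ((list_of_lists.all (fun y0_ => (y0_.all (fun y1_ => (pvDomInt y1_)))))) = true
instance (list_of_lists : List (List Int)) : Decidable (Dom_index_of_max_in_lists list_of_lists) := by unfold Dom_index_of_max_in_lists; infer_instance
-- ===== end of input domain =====

-- B scans each sublist once with a running best value/index pair instead of A's max()+index() two passes; result value is identical.


-- ===== PORT A =====
def index_of_max_in_lists (list_of_lists : List (List Int)) : List (Option Int) :=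
  list_of_lists.foldl
    (fun max_indices lst =>
      if lst.length == 0 then
        max_indices ++ [none]
      else
        -- max_index = lst.index(max(lst)); both succeed on a nonempty list
        max_indices ++ [((PySem.List.max? lst (fun y => y)).bind
          (fun m => PySem.List.index? lst m)).map (fun k => (k : Int))])
    []

-- ===== PORT B =====
def pvFirstMaxIndex (lst : List Int) : Option Int :=
  match lst with
  | [] => none
  | x :: _ =>
    -- best_i, best_v = 0, lst[0]; for i, v in enumerate(lst): if v > best_v: best_i, best_v = i, v
    some (((PySem.List.enumerate lst 0).foldl
      (fun (best : Int × Int) p => if p.2 > best.2 then p else best) ((0 : Int), x)).1)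

def index_of_max_in_lists_alt (list_of_lists : List (List Int)) : List (Option Int) :=
  list_of_lists.map pvFirstMaxIndex

-- ===== PRECONDITION & SPEC =====
def Spec_index_of_max_in_lists (list_of_lists : List (List Int)) (out : List (Option Int)) : Prop := out = index_of_max_in_lists_alt list_of_lists
instance (list_of_lists : List (List Int)) (out : List (Option Int)) : Decidable (Spec_index_of_max_in_lists list_of_lists out) := by unfold Spec_index_of_max_in_lists; infer_instance

-- ===== CLAIM (what is proved, stated in full; the proofs are below) =====
def Claim_equal_index_of_max_in_lists : Prop := ∀ (list_of_lists : List (List Int)), Dom_index_of_max_in_lists list_of_lists → Spec_index_of_max_in_lists list_of_lists (index_of_max_in_lists list_of_lists)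

-- ===== LEMMAS AND PROOFS =====

/-- Relative index of the first maximum among the elements of `xs` that strictly
exceed the running best `bv`; `none` if no element exceeds `bv`. -/
def pvArgmaxTail (bv : Int) : List Int → Option Nat
  | [] => none
  | v :: rest =>
    if bv < v then
      some (match pvArgmaxTail v rest with | none => 0 | some j => j + 1)
    else
      (pvArgmaxTail bv rest).map (· + 1)

theorem pvArgmaxTail_max (xs : List Int) : ∀ x : Int,
    (pvArgmaxTail x xs = none → xs.foldl max x = x) ∧
    (∀ j, pvArgmaxTail x xs = some j → x < xs.foldl max x) := by
  induction xs with
  | nil => intro x; simp [pvArgmaxTail]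
  | cons v rest ih =>
    intro x
    by_cases h : x < v
    · constructor
      · intro hn; simp [pvArgmaxTail, h] at hn
      · intro j _
        have h1 := (PySem.List.le_foldl_max rest v).1
        simp only [List.foldl_cons, max_eq_right (le_of_lt h)]
        omega
    · have hmax : max x v = x := by omega
      constructor
      · intro hn
        simp only [pvArgmaxTail, if_neg h, Option.map_eq_none_iff] at hn
        simpa [hmax] using (ih x).1 hn
      · intro j hj
        simp only [pvArgmaxTail, if_neg h, Option.map_eq_some_iff] at hj
        obtain ⟨j', hj', _⟩ := hj
        simpa [hmax] using (ih x).2 j' hj'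

theorem pvIndexMax (xs : List Int) : ∀ x : Int,
    PySem.List.index? (x :: xs) (xs.foldl max x) =
      some (match pvArgmaxTail x xs with | none => 0 | some j => j + 1) := by
  induction xs with
  | nil => intro x; simp [pvArgmaxTail]
  | cons v rest ih =>
    intro x
    by_cases h : x < v
    · -- new best v; the max lives in v :: rest and exceeds x
      have hM : (v :: rest).foldl max x = rest.foldl max v := by
        simp [max_eq_right (le_of_lt h)]
      have hvM : v ≤ rest.foldl max v := (PySem.List.le_foldl_max rest v).1
      have hne : x ≠ rest.foldl max v := by omega
      rw [hM, PySem.List.index?_cons_of_ne _ hne, ih v]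
      simp [pvArgmaxTail, h]
    · have hmax : max x v = x := by omega
      have hM : (v :: rest).foldl max x = rest.foldl max x := by simp [hmax]
      rcases hcase : pvArgmaxTail x rest with _ | j
      · -- everything ≤ x: the max is x itself, at index 0
        have hx : rest.foldl max x = x := (pvArgmaxTail_max rest x).1 hcase
        rw [hM, hx, PySem.List.index?_cons_self]
        simp [pvArgmaxTail, if_neg h, hcase]
      · have hlt : x < rest.foldl max x := (pvArgmaxTail_max rest x).2 j hcase
        have hnex : x ≠ rest.foldl max x := by omega
        have hnev : v ≠ rest.foldl max x := by omega
        have ihx := ih x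
        rw [hM] at *
        rw [PySem.List.index?_cons_of_ne _ hnex] at ihx
        rw [PySem.List.index?_cons_of_ne _ hnex, PySem.List.index?_cons_of_ne _ hnev]
        rcases hr : PySem.List.index? rest (rest.foldl max x) with _ | k
        · rw [hr] at ihx; simp at ihx
        · rw [hr] at ihx
          simp only [Option.map_some] at ihx ⊢
          simp [hcase] at ihx
          simp [pvArgmaxTail, h, hcase]
          omega

theorem pvBestFold (xs : List Int) : ∀ (i bi bv : Int),
    ((PySem.List.enumerate xs i).foldl
        (fun (best : Int × Int) p => if p.2 > best.2 then p else best) (bi, bv)).1 =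
      match pvArgmaxTail bv xs with | none => bi | some j => i + (j : Int) := by
  induction xs with
  | nil => intro i bi bv; simp [PySem.List.enumerate_nil, pvArgmaxTail]
  | cons v rest ih =>
    intro i bi bv
    rw [PySem.List.enumerate_cons]
    by_cases h : bv < v
    · simp only [List.foldl_cons, if_pos (show v > bv from h)]
      rw [ih (i + 1) i v]
      simp only [pvArgmaxTail, if_pos h]
      cases pvArgmaxTail v rest <;> simp <;> ring
    · simp only [List.foldl_cons, if_neg (show ¬ v > bv from h)]
      rw [ih (i + 1) bi bv]
      simp only [pvArgmaxTail, if_neg h]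
      cases pvArgmaxTail bv rest <;> simp <;> ring

/-- Per-sublist agreement of the two ports' element computations. -/
theorem pvElem_eq (lst : List Int) :
    (if lst.length == 0 then (none : Option Int)
     else ((PySem.List.max? lst (fun y => y)).bind
       (fun m => PySem.List.index? lst m)).map (fun k => (k : Int))) =
    pvFirstMaxIndex lst := by
  cases lst with
  | nil => simp [pvFirstMaxIndex]
  | cons x t =>
    simp only [List.length_cons, pvFirstMaxIndex]
    rw [PySem.List.max?_id_cons]
    simp only [Option.bind_some]
    rw [pvIndexMax t x]
    rw [PySem.List.enumerate_cons]
    simp only [List.foldl_cons, if_neg (show ¬ x > x by omega), show (0 : Int) + 1 = 1 from rfl]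
    rw [pvBestFold t 1 0 x]
    cases pvArgmaxTail x t with
    | none => simp
    | some j => simp; exact add_comm _ _

theorem pvFoldA (l : List (List Int)) : ∀ acc : List (Option Int),
    l.foldl
      (fun max_indices lst =>
        if lst.length == 0 then
          max_indices ++ [none]
        else
          max_indices ++ [((PySem.List.max? lst (fun y => y)).bind
            (fun m => PySem.List.index? lst m)).map (fun k => (k : Int))])
      acc = acc ++ l.map pvFirstMaxIndex := by
  induction l with
  | nil => intro acc; simp
  | cons lst rest ih =>
    intro acc
    by_cases h : lst.length = 0
    · simp only [List.foldl_cons, if_pos (show (lst.length == 0) = true by simp [h]), ih,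
        List.map_cons]
      rw [← pvElem_eq lst]
      simp [h]
    · simp only [List.foldl_cons, if_neg (show ¬ (lst.length == 0) = true by simp [h]), ih,
        List.map_cons]
      rw [← pvElem_eq lst]
      simp [h]

-- ===== VERDICT (by name: the statement is the Claim_ definition above) =====
theorem index_of_max_in_lists_spec : Claim_equal_index_of_max_in_lists := by
  intro l _
  show index_of_max_in_lists l = index_of_max_in_lists_alt l
  rw [index_of_max_in_lists, index_of_max_in_lists_alt, pvFoldA]
  simp
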